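-- pv_equiv track=rewrite | github.com/wherby/code | contest/00000c490d177/c493/q2/t2.py | countCommas
-- ===== SOURCE A (Python) =====
-- def countCommas(n: int) -> int:
--     cnt = 0
--     for i in range(3,19,3):
--         if n >= 10**i:
--             cnt += n-(10**i-1)
--         else:
--             break
--     return cnt
-- ===== SOURCE B (Python) =====
-- def countCommas(n: int) -> int:
--     # Count digit groups of three by repeated division, then a closed-form
--     # geometric-sum formula instead of accumulating per threshold.
--     k, m = 0, n
--     while m >= 1000 and k < 6:
--         k += 1
--         m //= 1000
--     return k * (n + 1) - 1000 * (1000 ** k - 1) // 999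
-- ===== Notes on version B (the rewrite author's own statement) =====
-- stated objective: alternative
-- what changed: Replaces the per-threshold accumulation loop with repeated division by 1000 to count crossed thresholds, then computes the sum in closed form via a geometric-series formula.
import Mathlib
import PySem

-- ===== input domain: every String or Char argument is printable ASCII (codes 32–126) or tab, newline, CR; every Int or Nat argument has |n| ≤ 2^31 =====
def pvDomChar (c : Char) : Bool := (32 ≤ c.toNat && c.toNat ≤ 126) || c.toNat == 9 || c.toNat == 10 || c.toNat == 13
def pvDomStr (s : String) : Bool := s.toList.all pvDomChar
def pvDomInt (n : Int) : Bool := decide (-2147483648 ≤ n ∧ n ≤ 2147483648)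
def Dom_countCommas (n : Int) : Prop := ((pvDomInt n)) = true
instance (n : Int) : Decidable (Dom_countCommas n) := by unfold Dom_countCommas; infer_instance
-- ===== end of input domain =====

-- B replaces A's per-threshold accumulation loop with repeated division by 1000
-- (counting crossed thresholds) plus a closed-form geometric-series formula.

-- ===== PORT A =====
-- the for-loop with break: recursion over the remaining range values, carrying cnt
def countCommasLoop (n : Int) : List Int → Int → Int
  | [], cnt => cnt
  | i :: rest, cnt =>
    if n ≥ (10 : Int) ^ i.toNat then countCommasLoop n rest (cnt + (n - ((10 : Int) ^ i.toNat - 1)))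
    else cnt

def countCommas (n : Int) : Int :=
  countCommasLoop n (PySem.List.pyRange 3 19 3) 0

-- ===== PORT B =====
-- the while-loop: 'while m >= 1000 and k < 6: k += 1; m //= 1000'
def countCommasAltLoop (k m : Int) : Int × Int :=
  if h : 1000 ≤ m ∧ k < 6 then countCommasAltLoop (k + 1) (PySem.Int.floordiv m 1000)
  else (k, m)
termination_by (6 - k).toNat
decreasing_by omega

def countCommas_alt (n : Int) : Int :=
  let p := countCommasAltLoop 0 n
  p.1 * (n + 1) - PySem.Int.floordiv (1000 * ((1000 : Int) ^ p.1.toNat - 1)) 999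

-- ===== PRECONDITION & SPEC =====
def Spec_countCommas (n : Int) (out : Int) : Prop := out = countCommas_alt n
instance (n : Int) (out : Int) : Decidable (Spec_countCommas n out) := by unfold Spec_countCommas; infer_instance

-- ===== CLAIM (what is proved, stated in full; the proofs are below) =====
def Claim_equal_countCommas : Prop := ∀ (n : Int), Dom_countCommas n → Spec_countCommas n (countCommas n)

-- ===== LEMMAS AND PROOFS =====

theorem altLoop_step (k m : Int) (h1 : 1000 ≤ m) (h2 : k < 6) :
    countCommasAltLoop k m = countCommasAltLoop (k + 1) (PySem.Int.floordiv m 1000) := by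
  rw [countCommasAltLoop]; simp [h1, h2]

theorem altLoop_stop (k m : Int) (h : m < 1000) :
    countCommasAltLoop k m = (k, m) := by
  rw [countCommasAltLoop]; simp; omega

theorem fd_lt (a q : Int) (h : a < q * 1000) : PySem.Int.floordiv a 1000 < q := by
  rw [PySem.Int.floordiv_lt_iff_lt_mul] <;> omega

theorem fd_le (a q : Int) (h : q * 1000 ≤ a) : q ≤ PySem.Int.floordiv a 1000 := by
  rw [PySem.Int.le_floordiv_iff_mul_le] <;> omega

theorem countCommas_eval_small (n : Int) (h : n < 1000) : countCommas n = 0 := by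
  have hr : PySem.List.pyRange 3 19 3 = [3, 6, 9, 12, 15, 18] := by decide
  have hp : ((10 : Int) ^ (3 : Int).toNat) = 1000 := by decide
  simp only [countCommas, hr, countCommasLoop, hp]
  rw [if_neg (by omega)]

theorem countCommas_eval1 (n : Int) (h1 : 1000 ≤ n) (h2 : n < 1000000) :
    countCommas n = n - 999 := by
  have hr : PySem.List.pyRange 3 19 3 = [3, 6, 9, 12, 15, 18] := by decide
  have hp3 : ((10 : Int) ^ (3 : Int).toNat) = 1000 := by decide
  have hp6 : ((10 : Int) ^ (6 : Int).toNat) = 1000000 := by decide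
  simp only [countCommas, hr, countCommasLoop, hp3, hp6]
  rw [if_pos (by omega), if_neg (by omega)]
  omega

theorem countCommas_eval2 (n : Int) (h1 : 1000000 ≤ n) (h2 : n < 1000000000) :
    countCommas n = 2 * n - 1000998 := by
  have hr : PySem.List.pyRange 3 19 3 = [3, 6, 9, 12, 15, 18] := by decide
  have hp3 : ((10 : Int) ^ (3 : Int).toNat) = 1000 := by decide
  have hp6 : ((10 : Int) ^ (6 : Int).toNat) = 1000000 := by decide
  have hp9 : ((10 : Int) ^ (9 : Int).toNat) = 1000000000 := by decide
  simp only [countCommas, hr, countCommasLoop, hp3, hp6, hp9]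
  rw [if_pos (by omega), if_pos (by omega), if_neg (by omega)]
  omega

theorem countCommas_eval3 (n : Int) (h1 : 1000000000 ≤ n) (h2 : n < 1000000000000) :
    countCommas n = 3 * n - 1001000997 := by
  have hr : PySem.List.pyRange 3 19 3 = [3, 6, 9, 12, 15, 18] := by decide
  have hp3 : ((10 : Int) ^ (3 : Int).toNat) = 1000 := by decide
  have hp6 : ((10 : Int) ^ (6 : Int).toNat) = 1000000 := by decide
  have hp9 : ((10 : Int) ^ (9 : Int).toNat) = 1000000000 := by decide
  have hp12 : ((10 : Int) ^ (12 : Int).toNat) = 1000000000000 := by decide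
  simp only [countCommas, hr, countCommasLoop, hp3, hp6, hp9, hp12]
  rw [if_pos (by omega), if_pos (by omega), if_pos (by omega), if_neg (by omega)]
  omega

theorem countCommas_spec_aux (n : Int) (hdom : Dom_countCommas n) :
    countCommas_alt n = countCommas n := by
  have hub : n ≤ 2147483648 := by
    simp only [Dom_countCommas, pvDomInt, decide_eq_true_eq] at hdom; exact hdom.2
  by_cases h0 : n < 1000
  · have hl : (countCommasAltLoop 0 n).1 = 0 := by rw [altLoop_stop 0 n h0]
    have hc : PySem.Int.floordiv (1000 * ((1000 : Int) ^ (0 : Int).toNat - 1)) 999 = 0 := by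
      decide
    simp only [countCommas_alt, hl, hc, countCommas_eval_small n h0]
    ring
  by_cases h1 : n < 1000000
  · have hm : PySem.Int.floordiv n 1000 < 1000 := fd_lt n 1000 (by omega)
    have hl : (countCommasAltLoop 0 n).1 = 1 := by
      rw [altLoop_step 0 n (by omega) (by omega), (by norm_num : (0:Int)+1 = 1)]
      rw [altLoop_stop 1 _ hm]
    have hc : PySem.Int.floordiv (1000 * ((1000 : Int) ^ (1 : Int).toNat - 1)) 999 = 1000 := by
      decide
    simp only [countCommas_alt, hl, hc, countCommas_eval1 n (by omega) h1]
    ring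
  by_cases h2 : n < 1000000000
  · have hm1 : (1000 : Int) ≤ PySem.Int.floordiv n 1000 := fd_le n 1000 (by omega)
    have hm2 : PySem.Int.floordiv (PySem.Int.floordiv n 1000) 1000 < 1000 :=
      fd_lt _ 1000 (by have := fd_lt n 1000000 (by omega); omega)
    have hl : (countCommasAltLoop 0 n).1 = 2 := by
      rw [altLoop_step 0 n (by omega) (by omega), (by norm_num : (0:Int)+1 = 1)]
      rw [altLoop_step 1 _ hm1 (by omega), (by norm_num : (1:Int)+1 = 2)]
      rw [altLoop_stop 2 _ hm2]
    have hc : PySem.Int.floordiv (1000 * ((1000 : Int) ^ (2 : Int).toNat - 1)) 999 = 1001000 :=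
      by decide
    simp only [countCommas_alt, hl, hc, countCommas_eval2 n (by omega) h2]
    ring
  · have hm1 : (1000 : Int) ≤ PySem.Int.floordiv n 1000 := fd_le n 1000 (by omega)
    have hm2 : (1000 : Int) ≤ PySem.Int.floordiv (PySem.Int.floordiv n 1000) 1000 :=
      fd_le _ 1000 (by have := fd_le n 1000000 (by omega); omega)
    have hm3 : PySem.Int.floordiv (PySem.Int.floordiv (PySem.Int.floordiv n 1000) 1000) 1000
        < 1000 := by
      have b1 : PySem.Int.floordiv n 1000 < 1000000000 := fd_lt n 1000000000 (by omega)
      have b2 : PySem.Int.floordiv (PySem.Int.floordiv n 1000) 1000 < 1000000 :=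
        fd_lt _ 1000000 (by omega)
      exact fd_lt _ 1000 (by omega)
    have hl : (countCommasAltLoop 0 n).1 = 3 := by
      rw [altLoop_step 0 n (by omega) (by omega), (by norm_num : (0:Int)+1 = 1)]
      rw [altLoop_step 1 _ hm1 (by omega), (by norm_num : (1:Int)+1 = 2)]
      rw [altLoop_step 2 _ hm2 (by omega), (by norm_num : (2:Int)+1 = 3)]
      rw [altLoop_stop 3 _ hm3]
    have hc : PySem.Int.floordiv (1000 * ((1000 : Int) ^ (3 : Int).toNat - 1)) 999 = 1001001000 :=
      by decide
    simp only [countCommas_alt, hl, hc, countCommas_eval3 n (by omega) (by omega)]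
    ring

-- ===== VERDICT (by name: the statement is the Claim_ definition above) =====
theorem countCommas_spec : Claim_equal_countCommas := by
  intro n hdom
  unfold Spec_countCommas
  exact (countCommas_spec_aux n hdom).symm
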